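-- pv_equiv track=rewrite | github.com/Siryoos/FlightioCrawler | adapters/base_adapters/enhanced_international_adapter.py | _map_cabin_class
-- ===== SOURCE A (Python) =====
-- def _map_cabin_class(cabin_class: str) -> str:
--     """Map cabin class to site-specific values."""
--     mapping = {
--         'economy': ['economy', 'eco', 'e', 'coach'],
--         'premium_economy': ['premium_economy', 'premium', 'pe', 'premium_eco'],
--         'business': ['business', 'biz', 'b', 'business_class'],
--         'first': ['first', 'f', 'first_class', 'firstclass']
--     }
--
--     cabin_lower = cabin_class.lower()
--     for key, values in mapping.items():
--         if cabin_lower in values: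
--             return key
--
--     return cabin_class  # Return original if no mapping found
-- ===== SOURCE B (Python) =====
-- _REVERSE_CABIN_MAP = {
--     alias: key
--     for key, aliases in {
--         'economy': ['economy', 'eco', 'e', 'coach'],
--         'premium_economy': ['premium_economy', 'premium', 'pe', 'premium_eco'],
--         'business': ['business', 'biz', 'b', 'business_class'],
--         'first': ['first', 'f', 'first_class', 'firstclass'],
--     }.items()
--     for alias in aliases
-- }
--
--
-- def _map_cabin_class(cabin_class: str) -> str:
--     """Map cabin class to site-specific values."""
--     return _REVERSE_CABIN_MAP.get(cabin_class.lower(), cabin_class)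
-- ===== Notes on version B (the rewrite author's own statement) =====
-- stated objective: idiomatic
-- what changed: Replaced the per-key loop with a membership scan over each alias list by a single precomputed flat reverse dictionary (alias -> canonical key), so the body is one dict .get with the original string as default.
import Mathlib
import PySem

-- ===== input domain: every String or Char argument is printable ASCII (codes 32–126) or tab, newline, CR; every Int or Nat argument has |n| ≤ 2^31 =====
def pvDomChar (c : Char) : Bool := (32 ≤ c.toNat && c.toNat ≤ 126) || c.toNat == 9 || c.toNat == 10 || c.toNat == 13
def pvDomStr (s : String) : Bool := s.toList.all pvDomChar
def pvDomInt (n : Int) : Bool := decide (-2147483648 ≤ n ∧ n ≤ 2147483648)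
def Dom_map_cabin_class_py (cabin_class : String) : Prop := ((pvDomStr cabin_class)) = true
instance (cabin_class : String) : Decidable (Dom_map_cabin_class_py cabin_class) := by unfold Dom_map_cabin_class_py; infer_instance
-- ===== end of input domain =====

-- B replaces A's loop over (key, alias-list) pairs with one precomputed flat reverse
-- dictionary alias -> canonical key and a single .get lookup (idiomatic; same results).


-- ===== PORT A =====
-- A's dict of key -> alias list, iterated in insertion order.
def pvCabinMapping : List (String × List String) :=
  [("economy", ["economy", "eco", "e", "coach"]),
   ("premium_economy", ["premium_economy", "premium", "pe", "premium_eco"]),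
   ("business", ["business", "biz", "b", "business_class"]),
   ("first", ["first", "f", "first_class", "firstclass"])]

-- the 'for key, values in mapping.items(): if cabin_lower in values: return key' loop
def pvCabinLoop (pairs : List (String × List String)) (cl : String) : Option String :=
  match pairs with
  | [] => none
  | (key, values) :: rest => if cl ∈ values then some key else pvCabinLoop rest cl

def map_cabin_class_py (cabin_class : String) : String :=
  let cabin_lower := PySem.Str.lower cabin_class
  match pvCabinLoop pvCabinMapping cabin_lower with
  | some key => key
  | none => cabin_class

-- ===== PORT B =====
-- B's flat reverse dictionary alias -> canonical key (built once in Source B by a comprehension).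
def pvReverseCabinMap : PySem.Dict String String :=
  PySem.Dict.ofList
    [("economy", "economy"), ("eco", "economy"), ("e", "economy"), ("coach", "economy"),
     ("premium_economy", "premium_economy"), ("premium", "premium_economy"),
     ("pe", "premium_economy"), ("premium_eco", "premium_economy"),
     ("business", "business"), ("biz", "business"), ("b", "business"),
     ("business_class", "business"),
     ("first", "first"), ("f", "first"), ("first_class", "first"), ("firstclass", "first")]

def map_cabin_class_py_alt (cabin_class : String) : String :=
  pvReverseCabinMap.getD (PySem.Str.lower cabin_class) cabin_class

-- ===== PRECONDITION & SPEC =====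
def Spec_map_cabin_class_py (cabin_class : String) (out : String) : Prop := out = map_cabin_class_py_alt cabin_class
instance (cabin_class : String) (out : String) : Decidable (Spec_map_cabin_class_py cabin_class out) := by unfold Spec_map_cabin_class_py; infer_instance

-- ===== CLAIM (what is proved, stated in full; the proofs are below) =====
def Claim_equal_map_cabin_class_py : Prop := ∀ (cabin_class : String), Dom_map_cabin_class_py cabin_class → Spec_map_cabin_class_py cabin_class (map_cabin_class_py cabin_class)

-- ===== LEMMAS AND PROOFS =====

-- core lemma: for any lowered string cl and original string, the loop over A's mapping
-- and the lookup in B's flat reverse map agree.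
theorem pvCabinLoop_eq_getD (cl orig : String) :
    (match pvCabinLoop pvCabinMapping cl with
     | some key => key
     | none => orig) = pvReverseCabinMap.getD cl orig := by
  have hit : pvReverseCabinMap.items =
      [("economy", "economy"), ("eco", "economy"), ("e", "economy"), ("coach", "economy"),
       ("premium_economy", "premium_economy"), ("premium", "premium_economy"),
       ("pe", "premium_economy"), ("premium_eco", "premium_economy"),
       ("business", "business"), ("biz", "business"), ("b", "business"),
       ("business_class", "business"),
       ("first", "first"), ("f", "first"), ("first_class", "first"), ("firstclass", "first")] := by
    rfl
  simp only [pvCabinLoop, pvCabinMapping, List.mem_cons, List.not_mem_nil, or_false]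
  split_ifs with h1 h2 h3 h4
  · rcases h1 with rfl | rfl | rfl | rfl <;> rfl
  · rcases h2 with rfl | rfl | rfl | rfl <;> rfl
  · rcases h3 with rfl | rfl | rfl | rfl <;> rfl
  · rcases h4 with rfl | rfl | rfl | rfl <;> rfl
  · push Not at h1 h2 h3 h4
    obtain ⟨a1, a2, a3, a4⟩ := h1
    obtain ⟨b1, b2, b3, b4⟩ := h2
    obtain ⟨c1, c2, c3, c4⟩ := h3
    obtain ⟨d1, d2, d3, d4⟩ := h4
    simp [PySem.Dict.getD, PySem.Dict.get?, hit, beq_iff_eq,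
      Ne.symm a1, Ne.symm a2, Ne.symm a3, Ne.symm a4,
      Ne.symm b1, Ne.symm b2, Ne.symm b3, Ne.symm b4,
      Ne.symm c1, Ne.symm c2, Ne.symm c3, Ne.symm c4,
      Ne.symm d1, Ne.symm d2, Ne.symm d3, Ne.symm d4]

-- ===== VERDICT (by name: the statement is the Claim_ definition above) =====
theorem map_cabin_class_py_spec : Claim_equal_map_cabin_class_py := by
  intro cabin_class _
  unfold Spec_map_cabin_class_py map_cabin_class_py map_cabin_class_py_alt
  exact pvCabinLoop_eq_getD _ _
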